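-- pv_equiv track=rewrite | github.com/herbertlohmus/herbertlohmus.github.io | youtubedl.py | compile_italic_star
-- ===== SOURCE A (Python) =====
-- def compile_italic_star(line):
--     '''
--     Convert "*italic*" into "<i>italic</i>".
--     HINT:
--     Italics require carefully tracking the beginning and ending positions of the text to be replaced.
--     This is similar to the `delete_HTML` function that we implemented in class.
--     It's a tiny bit more complicated since we are not just deleting substrings from the text,
--     but also adding replacement substrings.
--     >>> compile_italic_star('*This is italic!* This is not italic.')
--     '<i>This is italic!</i> This is not italic.'
--     >>> compile_italic_star('*This is italic!*')
--     '<i>This is italic!</i>'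
--     >>> compile_italic_star('This is *italic*!')
--     'This is <i>italic</i>!'
--     >>> compile_italic_star('This is not *italic!')
--     'This is not *italic!'
--     >>> compile_italic_star('*')
--     '*'
--     '''
--     start_index = None
--     stop_index = None
--     for i in range(len(line)):
--         if line[i] == '*':
--             if start_index is None:
--                 start_index = i
--             else:
--                 stop_index = i
--
--     if start_index is not None and stop_index is not None:
--         new_line = line[:start_index] + '<i>' + line[start_index +
--                                                      1:stop_index] + '</i>' + line[stop_index+1:]
--     else:
--         new_line = line
--
--     return new_line
-- ===== SOURCE B (Python) =====
-- def compile_italic_star(line):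
--     parts = line.split('*')
--     if len(parts) < 3:
--         return line
--     return parts[0] + '<i>' + '*'.join(parts[1:-1]) + '</i>' + parts[-1]
-- ===== Notes on version B (the rewrite author's own statement) =====
-- stated objective: idiomatic
-- what changed: Instead of tracking first/last asterisk indices with an explicit per-character loop and slicing, B splits the line into pieces on the asterisk separator and, when there are at least two asterisks, rejoins the interior pieces between <i> tags, keeping the outer pieces as prefix and suffix.
import Mathlib
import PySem

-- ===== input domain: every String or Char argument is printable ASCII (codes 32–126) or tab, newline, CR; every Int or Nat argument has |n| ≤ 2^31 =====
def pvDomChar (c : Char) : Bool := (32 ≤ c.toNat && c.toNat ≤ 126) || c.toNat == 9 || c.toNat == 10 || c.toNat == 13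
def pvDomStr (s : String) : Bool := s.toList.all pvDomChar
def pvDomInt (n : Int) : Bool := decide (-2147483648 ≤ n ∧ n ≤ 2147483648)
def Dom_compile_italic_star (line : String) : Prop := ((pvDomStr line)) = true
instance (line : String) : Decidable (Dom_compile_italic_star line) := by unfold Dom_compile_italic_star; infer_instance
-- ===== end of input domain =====

-- B replaces A's first/last-asterisk index tracking with split-on-'*' and rejoining the interior pieces (idiomatic; same O(n) cost).

-- ===== PORT A =====
-- the loop state (start_index, stop_index); a '*' at i sets start_index if unset, else stop_index
def pvAStep (st : Option Int × Option Int) (i : Int) : Option Int × Option Int :=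
  match st.1 with
  | none => (some i, st.2)
  | some _ => (st.1, some i)

def compile_italic_star (line : String) : String :=
  let cs := line.toList
  let st := (PySem.List.pyRange 0 (cs.length : Int) 1).foldl
      (fun st i => if PySem.List.pyGetD cs i ' ' == '*' then pvAStep st i else st)
      (none, none)
  match st with
  | (some si, some ti) =>
      String.ofList (PySem.List.slice cs none (some si) ++ "<i>".toList
        ++ PySem.List.slice cs (some (si + 1)) (some ti) ++ "</i>".toList
        ++ PySem.List.slice cs (some (ti + 1)) none)
  | _ => line

-- ===== PORT B =====
-- line.split('*') is ported as List.splitOn '*' (the corresponding library function;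
-- identical to Python's split for a one-character separator), '*'.join as PySem.Chars.join.
def compile_italic_star_alt (line : String) : String :=
  let parts := List.splitOn '*' line.toList
  if parts.length < 3 then line
  else
    String.ofList (PySem.List.pyGetD parts 0 [] ++ "<i>".toList
      ++ PySem.Chars.join ['*'] (PySem.List.slice parts (some 1) (some (-1)))
      ++ "</i>".toList ++ PySem.List.pyGetD parts (-1) [])

-- ===== PRECONDITION & SPEC =====
def Spec_compile_italic_star (line : String) (out : String) : Prop := out = compile_italic_star_alt line
instance (line : String) (out : String) : Decidable (Spec_compile_italic_star line out) := by unfold Spec_compile_italic_star; infer_instance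

-- ===== CLAIM (what is proved, stated in full; the proofs are below) =====
def Claim_equal_compile_italic_star : Prop := ∀ (line : String), Dom_compile_italic_star line → Spec_compile_italic_star line (compile_italic_star line)

-- ===== LEMMAS AND PROOFS =====

-- index of the first '*' in a list, if any
def pvFirstStar : List Char → Option Nat
  | [] => none
  | c :: t => if c = '*' then some 0 else (pvFirstStar t).map (· + 1)

-- index of the last '*' in a list, if any
def pvLastStar : List Char → Option Nat
  | [] => none
  | c :: t =>
    match pvLastStar t with
    | some n => some (n + 1)
    | none => if c = '*' then some 0 else none

-- A's loop as a structural recursion over the character list, carrying the Int index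
def pvListLoop : List Char → Int → Option Int × Option Int → Option Int × Option Int
  | [], _, st => st
  | c :: t, i, st => pvListLoop t (i + 1) (if c = '*' then pvAStep st i else st)

theorem pvFoldl_eq_listLoop (full : List Char) :
    ∀ (cs : List Char) (k : Nat), full.drop k = cs → ∀ st,
      (PySem.List.pyRange (k : Int) (full.length : Int) 1).foldl
        (fun st i => if PySem.List.pyGetD full i ' ' == '*' then pvAStep st i else st) st
      = pvListLoop cs (k : Int) st := by
  intro cs
  induction cs with
  | nil =>
    intro k hk st
    have hlen : full.length ≤ k := List.drop_eq_nil_iff.mp hk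
    rw [PySem.List.pyRange_one_eq_nil (by exact_mod_cast hlen)]
    rfl
  | cons c t ih =>
    intro k hk st
    have hklt : k < full.length := by
      by_contra h
      rw [List.drop_eq_nil_iff.mpr (by omega)] at hk
      simp at hk
    have hget : full[k]? = some c := by
      have h0 : (full.drop k)[0]? = full[k]? := by
        rw [List.getElem?_drop]; simp
      rw [hk] at h0
      exact h0.symm
    rw [PySem.List.pyRange_one_cons (by exact_mod_cast hklt)]
    rw [List.foldl_cons]
    have hgd : PySem.List.pyGetD full (k : Int) ' ' = c := by
      rw [PySem.List.pyGetD_natCast]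
      simp [List.getD, hget]
    have hdrop : full.drop (k + 1) = t := by
      have : full.drop (k + 1) = (full.drop k).drop 1 := by
        rw [List.drop_drop]
      rw [this, hk]
      rfl
    have := ih (k + 1) hdrop (if PySem.List.pyGetD full (k : Int) ' ' == '*' then pvAStep st (k : Int) else st)
    rw [show ((k : Int) + 1) = ((k + 1 : Nat) : Int) by push_cast; ring] at *
    rw [this]
    simp only [pvListLoop, hgd]
    by_cases h : c = '*' <;> simp [h]

theorem pvListLoop_some (t : List Char) :
    ∀ (i : Int) (f : Int) (b : Option Int),
      pvListLoop t i (some f, b)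
        = (some f, match pvLastStar t with | none => b | some n => some (i + n)) := by
  induction t with
  | nil => intro i f b; rfl
  | cons c t ih =>
    intro i f b
    simp only [pvListLoop]
    by_cases h : c = '*'
    · rw [if_pos h]
      simp only [pvAStep]
      rw [ih]
      cases hlt : pvLastStar t with
      | none => simp [pvLastStar, hlt, h]
      | some n =>
        simp only [pvLastStar, hlt, Prod.mk.injEq, Option.some.injEq, true_and]
        push_cast; ring
    · rw [if_neg h, ih]
      cases hlt : pvLastStar t with
      | none => simp [pvLastStar, hlt, h]
      | some n =>
        simp only [pvLastStar, hlt, Prod.mk.injEq, Option.some.injEq, true_and]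
        push_cast; ring

theorem pvListLoop_none (cs : List Char) :
    ∀ (i : Int),
      pvListLoop cs i (none, none)
        = match pvFirstStar cs with
          | none => (none, none)
          | some p => (some (i + p),
              match pvLastStar (cs.drop (p + 1)) with
              | none => none
              | some n => some (i + p + 1 + n)) := by
  induction cs with
  | nil => intro i; rfl
  | cons c t ih =>
    intro i
    simp only [pvListLoop]
    by_cases h : c = '*'
    · rw [if_pos h]
      simp only [pvAStep]
      rw [pvListLoop_some]
      simp only [pvFirstStar, if_pos h, List.drop_succ_cons, List.drop_zero]
      cases hlt : pvLastStar t with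
      | none => simp
      | some n =>
        simp only [Prod.mk.injEq, Option.some.injEq]
        constructor
        · push_cast; ring
        · push_cast; ring
    · rw [if_neg h, ih]
      simp only [pvFirstStar, if_neg h]
      cases hfs : pvFirstStar t with
      | none => simp
      | some p =>
        simp only [Option.map_some, List.drop_succ_cons]
        cases hlt : pvLastStar (t.drop (p + 1)) with
        | none =>
          simp only [Prod.mk.injEq, Option.some.injEq, and_true]
          push_cast; ring
        | some n =>
          simp only [Prod.mk.injEq, Option.some.injEq]
          constructor
          · push_cast; ring
          · push_cast; ring

theorem pvFirstStar_none_of_lastStar_none (cs : List Char) :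
    pvLastStar cs = none → pvFirstStar cs = none := by
  induction cs with
  | nil => intro _; rfl
  | cons c t ih =>
    intro h
    simp only [pvLastStar] at h
    cases hlt : pvLastStar t with
    | some n => rw [hlt] at h; exact absurd h (by simp)
    | none =>
      rw [hlt] at h
      by_cases hc : c = '*'
      · rw [if_pos hc] at h; exact absurd h (by simp)
      · simp only [pvFirstStar, if_neg hc, ih hlt, Option.map_none]

theorem pvSplitOn_eq (xs : List Char) : List.splitOn '*' xs = List.splitOnP (· == '*') xs := rfl

-- splitOn when there is no star: one piece, the whole list
theorem pvSplit_of_no_star (cs : List Char) :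
    pvFirstStar cs = none → List.splitOn '*' cs = [cs] := by
  induction cs with
  | nil => intro _; rfl
  | cons c t ih =>
    intro h
    simp only [pvFirstStar] at h
    by_cases hc : c = '*'
    · rw [if_pos hc] at h; exact absurd h (by simp)
    · rw [if_neg hc] at h
      simp only [Option.map_eq_none_iff] at h
      show List.splitOnP (· == '*') (c :: t) = _
      rw [List.splitOnP_cons]
      have : List.splitOnP (· == '*') t = [t] := ih h
      simp [hc, this]

-- splitOn peels the prefix before the first star
theorem pvSplit_of_firstStar (cs : List Char) :
    ∀ (p : Nat), pvFirstStar cs = some p →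
      List.splitOn '*' cs = cs.take p :: List.splitOn '*' (cs.drop (p + 1)) := by
  induction cs with
  | nil => intro p h; simp [pvFirstStar] at h
  | cons c t ih =>
    intro p h
    simp only [pvFirstStar] at h
    by_cases hc : c = '*'
    · rw [if_pos hc] at h
      cases h
      show List.splitOnP (· == '*') (c :: t) = _
      rw [List.splitOnP_cons]
      simp [hc, pvSplitOn_eq]
    · rw [if_neg hc] at h
      cases hfs : pvFirstStar t with
      | none => rw [hfs] at h; simp at h
      | some q =>
        rw [hfs] at h
        simp only [Option.map_some, Option.some.injEq] at h
        subst h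
        show List.splitOnP (· == '*') (c :: t) = _
        rw [List.splitOnP_cons]
        have : List.splitOnP (· == '*') t
            = t.take q :: List.splitOnP (· == '*') (t.drop (q + 1)) := by
          rw [← pvSplitOn_eq, ← pvSplitOn_eq]; exact ih q hfs
        simp [hc, this, pvSplitOn_eq]

-- splitOn peels the suffix after the last star
theorem pvSplit_of_lastStar (cs : List Char) :
    ∀ (n : Nat), pvLastStar cs = some n →
      List.splitOn '*' cs = List.splitOn '*' (cs.take n) ++ [cs.drop (n + 1)] := by
  induction cs with
  | nil => intro n h; simp [pvLastStar] at h
  | cons c t ih =>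
    intro n h
    simp only [pvLastStar] at h
    cases hlt : pvLastStar t with
    | some m =>
      rw [hlt] at h
      simp only [Option.some.injEq] at h
      subst h
      show List.splitOnP (· == '*') (c :: t) = _
      rw [List.splitOnP_cons]
      have iht : List.splitOnP (· == '*') t
          = List.splitOn '*' (t.take m) ++ [t.drop (m + 1)] := ih m hlt
      by_cases hc : c = '*'
      · simp only [hc]
        show _ = List.splitOnP (· == '*') ('*' :: t.take m) ++ _
        rw [List.splitOnP_cons]
        simp [iht, pvSplitOn_eq]
      · simp only [List.take_succ_cons, List.drop_succ_cons]
        show _ = List.splitOnP (· == '*') (c :: t.take m) ++ _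
        rw [List.splitOnP_cons]
        have hne : List.splitOnP (· == '*') (t.take m) ≠ [] := List.splitOnP_ne_nil _ _
        cases hsp : List.splitOnP (· == '*') (t.take m) with
        | nil => exact absurd hsp hne
        | cons a as =>
          rw [show List.splitOn '*' (t.take m) = List.splitOnP (· == '*') (t.take m) from rfl, hsp] at iht
          simp [hc, iht]
    | none =>
      rw [hlt] at h
      by_cases hc : c = '*'
      · rw [if_pos hc] at h
        simp only [Option.some.injEq] at h
        subst h
        show List.splitOnP (· == '*') (c :: t) = _
        rw [List.splitOnP_cons]
        have hfs : pvFirstStar t = none := pvFirstStar_none_of_lastStar_none t hlt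
        have : List.splitOnP (· == '*') t = [t] := pvSplit_of_no_star t hfs
        simp [hc, this]
      · rw [if_neg hc] at h; exact absurd h (by simp)

-- the PySem slice [1:-1] of a list of shape a :: (xs ++ [b]) is xs
theorem pvSlice_one_negone {α : Type} (a b : α) (xs : List α) :
    PySem.List.slice (a :: (xs ++ [b])) (some 1) (some (-1)) = xs := by
  simp [PySem.List.slice]

-- pyGetD at -1 of xs ++ [b] is b
theorem pvPyGetD_neg_one {α : Type} (b d : α) (xs : List α) :
    PySem.List.pyGetD (xs ++ [b]) (-1) d = b := by
  simp [PySem.List.pyGetD, PySem.List.pyGet?, PySem.List.pyIdx?]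

-- ===== VERDICT (by name: the statement is the Claim_ definition above) =====
theorem compile_italic_star_spec : Claim_equal_compile_italic_star := by
  intro line _
  unfold Spec_compile_italic_star compile_italic_star compile_italic_star_alt
  set cs := line.toList with hcs
  have hloop := pvFoldl_eq_listLoop cs cs 0 (by simp) (none, none)
  rw [show ((0 : Nat) : Int) = (0 : Int) by rfl] at hloop
  simp only [hloop, pvListLoop_none]
  cases hfs : pvFirstStar cs with
  | none =>
    have hsp : List.splitOn '*' cs = [cs] := pvSplit_of_no_star cs hfs
    simp [hsp]
  | some p =>
    have hsp1 : List.splitOn '*' cs = cs.take p :: List.splitOn '*' (cs.drop (p + 1)) :=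
      pvSplit_of_firstStar cs p hfs
    cases hlt : pvLastStar (cs.drop (p + 1)) with
    | none =>
      have hfs2 : pvFirstStar (cs.drop (p + 1)) = none :=
        pvFirstStar_none_of_lastStar_none _ hlt
      have hsp2 : List.splitOn '*' (cs.drop (p + 1)) = [cs.drop (p + 1)] :=
        pvSplit_of_no_star _ hfs2
      rw [hsp1, hsp2]
      simp [hlt]
    | some n =>
      have hsp2 : List.splitOn '*' (cs.drop (p + 1))
          = List.splitOn '*' ((cs.drop (p + 1)).take n) ++ [(cs.drop (p + 1)).drop (n + 1)] :=
        pvSplit_of_lastStar _ n hlt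
      have hmidne : List.splitOn '*' ((cs.drop (p + 1)).take n) ≠ [] :=
        List.splitOnP_ne_nil _ _
      cases hmid : List.splitOn '*' ((cs.drop (p + 1)).take n) with
      | nil => exact absurd hmid hmidne
      | cons m ms =>
        simp only []
        rw [hlt]
        have hparts : List.splitOn '*' cs
            = cs.take p :: ((m :: ms) ++ [(cs.drop (p + 1)).drop (n + 1)]) := by
          rw [hsp1, hsp2, hmid]
        rw [hparts]
        have hlen3 : ¬ ((cs.take p :: ((m :: ms) ++ [(cs.drop (p + 1)).drop (n + 1)])).length < 3) := by
          simp
        rw [if_neg hlen3]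
        have hget0 : PySem.List.pyGetD (cs.take p :: ((m :: ms) ++ [(cs.drop (p + 1)).drop (n + 1)])) 0 []
            = cs.take p := by
          rw [show ((0 : Int)) = ((0 : Nat) : Int) by rfl, PySem.List.pyGetD_natCast]
          rfl
        have hslice : PySem.List.slice (cs.take p :: ((m :: ms) ++ [(cs.drop (p + 1)).drop (n + 1)]))
            (some 1) (some (-1)) = m :: ms := pvSlice_one_negone _ _ _
        have hlast : PySem.List.pyGetD (cs.take p :: ((m :: ms) ++ [(cs.drop (p + 1)).drop (n + 1)])) (-1) []
            = (cs.drop (p + 1)).drop (n + 1) := by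
          rw [show (cs.take p :: ((m :: ms) ++ [(cs.drop (p + 1)).drop (n + 1)]))
              = (cs.take p :: m :: ms) ++ [(cs.drop (p + 1)).drop (n + 1)] by simp]
          exact pvPyGetD_neg_one _ _ _
        have hjoin : PySem.Chars.join ['*'] (m :: ms) = (cs.drop (p + 1)).take n := by
          show List.intercalate ['*'] (m :: ms) = (cs.drop (p + 1)).take n
          rw [← hmid]
          exact List.intercalate_splitOn _ '*'
        rw [hget0, hslice, hjoin, hlast]
        -- A side: reduce the match and normalise the slice bounds
        simp only [zero_add]
        rw [show ((p : Nat) : Int) + 1 = (((p + 1 : Nat)) : Int) by push_cast; ring]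
        rw [show (((p + 1 : Nat)) : Int) + (n : Nat) + 1 = (((p + 1 + n + 1 : Nat)) : Int) by push_cast; ring]
        rw [PySem.List.slice_to_natCast, PySem.List.slice_natCast_add, PySem.List.slice_from_natCast]
        have hdd : (cs.drop (p + 1)).drop (n + 1) = cs.drop (p + 1 + n + 1) := by
          rw [List.drop_drop]
          try congr 1
          try omega
        rw [hdd]
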